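-- pv_equiv track=rewrite | github.com/abhisheksahu92/Programming | Solutions/special_interval_siemens.py | Special_Interval
-- ===== SOURCE A (Python) =====
-- def Special_Interval (nonspecial, special):
--     # Write your code here
--     li = []
--     for x in nonspecial:
--         count = 0
--         for y in special:
--             if x[0] <= y[1]:
--                 count += 1
--         li.append(count)
--     return li
-- ===== SOURCE B (Python) =====
-- def Special_Interval(nonspecial, special):
--     # Sort the special right-endpoints once, then answer each query by
--     # binary search: count of ends >= x[0] is m - (number of ends < x[0]).
--     ends = sorted(y[1] for y in special)
--     m = len(ends)
--     res = []
--     for x in nonspecial: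
--         target = x[0]
--         lo, hi = 0, m
--         while lo < hi:
--             mid = (lo + hi) // 2
--             if ends[mid] < target:
--                 lo = mid + 1
--             else:
--                 hi = mid
--         res.append(m - lo)
--     return res
-- ===== Notes on version B (the rewrite author's own statement) =====
-- stated objective: faster
-- what changed: Replaces the inner linear scan over special for each nonspecial row by one sort of the special right-endpoints followed by a hand-written binary search per query; Pre_ excludes inputs where A returns only by lazy evaluation (empty special with an empty nonspecial row, or empty nonspecial with a short special row) since B eagerly indexes x[0] and y[1] and raises there.
-- outside the precondition, e.g. on Special_Interval([[]], []): A returns [0], B raises IndexError; on Special_Interval([], [[1]]): A returns [], B raises IndexError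
import Mathlib
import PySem

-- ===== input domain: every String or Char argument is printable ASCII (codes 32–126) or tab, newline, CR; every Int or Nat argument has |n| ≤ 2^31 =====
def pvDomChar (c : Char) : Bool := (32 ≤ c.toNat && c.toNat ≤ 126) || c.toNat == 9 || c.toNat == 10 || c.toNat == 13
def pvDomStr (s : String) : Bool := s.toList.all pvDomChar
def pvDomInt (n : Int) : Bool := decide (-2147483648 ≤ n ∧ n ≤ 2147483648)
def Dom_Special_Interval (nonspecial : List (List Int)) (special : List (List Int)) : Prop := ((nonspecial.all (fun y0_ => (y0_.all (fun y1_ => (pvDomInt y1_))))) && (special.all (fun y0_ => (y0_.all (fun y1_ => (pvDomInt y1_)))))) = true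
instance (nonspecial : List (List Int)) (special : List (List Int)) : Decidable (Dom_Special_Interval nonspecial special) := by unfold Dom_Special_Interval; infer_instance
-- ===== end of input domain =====

-- B replaces A's quadratic per-row scan by one sort of the special right-endpoints
-- plus a binary search per nonspecial row (faster, asymptotic).

-- ===== PORT A =====
def Special_Interval (nonspecial : List (List Int)) (special : List (List Int)) : List Int :=
  nonspecial.foldl (fun li x =>
    li ++ [special.foldl (fun count y =>
      if PySem.List.pyGetD x (0 : Int) 0 ≤ PySem.List.pyGetD y (1 : Int) 0 then count + 1 else count)
      (0 : Int)]) []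

-- ===== PORT B =====
-- hand-written binary search loop of Source B (lo/hi are the Python ints, always ≥ 0);
-- fuel is only a structural termination guard: any fuel ≥ hi - lo gives the loop's value
def pvBl (ends : List Int) (target : Int) : Nat → Nat → Nat → Nat
  | 0, lo, _ => lo
  | fuel + 1, lo, hi =>
    if lo < hi then
      let mid := (lo + hi) / 2
      if PySem.List.pyGetD ends (mid : Int) 0 < target then pvBl ends target fuel (mid + 1) hi
      else pvBl ends target fuel lo mid
    else lo

def Special_Interval_alt (nonspecial : List (List Int)) (special : List (List Int)) : List Int :=
  let ends := PySem.List.sorted (special.map (fun y => PySem.List.pyGetD y (1 : Int) 0)) (fun e => e) false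
  let m := ends.length
  nonspecial.foldl (fun res x =>
    res ++ [(m : Int) - (pvBl ends (PySem.List.pyGetD x (0 : Int) 0) m 0 m : Int)]) []

-- ===== PRECONDITION & SPEC =====
-- Pre_ = exactly where Python A returns without IndexError except for two lazy-evaluation
-- corners it also excludes (empty special with an empty nonspecial row; empty nonspecial
-- with a special row shorter than 2): there A returns by never evaluating x[0]/y[1],
-- while B evaluates them eagerly and raises.
def Pre_Special_Interval (nonspecial : List (List Int)) (special : List (List Int)) : Prop :=
  (∀ x ∈ nonspecial, x ≠ []) ∧ (∀ y ∈ special, 2 ≤ y.length)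
instance (nonspecial : List (List Int)) (special : List (List Int)) : Decidable (Pre_Special_Interval nonspecial special) := by unfold Pre_Special_Interval; infer_instance

def pvWitness_Special_Interval : List (List Int) × List (List Int) := ([[1], [3]], [[0, 2], [1, 5]])

def Spec_Special_Interval (nonspecial : List (List Int)) (special : List (List Int)) (out : List Int) : Prop := out = Special_Interval_alt nonspecial special
instance (nonspecial : List (List Int)) (special : List (List Int)) (out : List Int) : Decidable (Spec_Special_Interval nonspecial special out) := by unfold Spec_Special_Interval; infer_instance

-- ===== CLAIM (what is proved, stated in full; the proofs are below) =====
def Claim_equal_Special_Interval : Prop := ∀ (nonspecial : List (List Int)) (special : List (List Int)), Dom_Special_Interval nonspecial special → Pre_Special_Interval nonspecial special → Spec_Special_Interval nonspecial special (Special_Interval nonspecial special)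

-- ===== LEMMAS AND PROOFS =====

-- if l[mid] < t in a sorted list, at least mid+1 elements are < t
lemma pv_lt_count (l : List Int) (t : Int) (hs : l.Pairwise (· ≤ ·)) (mid : Nat)
    (hm : mid < l.length) (h : l[mid] < t) :
    mid < l.countP (fun e => decide (e < t)) := by
  have hsplit : l = l.take (mid + 1) ++ l.drop (mid + 1) := (List.take_append_drop _ _).symm
  have hall : ∀ a ∈ l.take (mid + 1), (fun e => decide (e < t)) a = true := by
    intro a ha
    obtain ⟨i, hi, rfl⟩ := List.getElem_of_mem ha
    have hi' : i < mid + 1 := lt_of_lt_of_le hi (by simp)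
    have hgi : (l.take (mid + 1))[i] = l[i]'(by omega) := List.getElem_take ..
    rw [hgi]
    rcases Nat.lt_or_ge i mid with hlt | hge
    · have := (List.pairwise_iff_getElem.mp hs) i mid (by omega) hm hlt
      simpa using lt_of_le_of_lt this h
    · have : i = mid := by omega
      subst this; simpa using h
  have hcnt : (l.take (mid + 1)).countP (fun e => decide (e < t)) = (l.take (mid + 1)).length :=
    List.countP_eq_length.mpr hall
  have hlen : (l.take (mid + 1)).length = mid + 1 := by simp; omega
  calc mid < mid + 1 := by omega
    _ = (l.take (mid + 1)).countP (fun e => decide (e < t)) := by rw [hcnt, hlen]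
    _ ≤ l.countP (fun e => decide (e < t)) := by
        conv_rhs => rw [hsplit]
        rw [List.countP_append]; omega

-- if t ≤ l[mid] in a sorted list, at most mid elements are < t
lemma pv_count_le (l : List Int) (t : Int) (hs : l.Pairwise (· ≤ ·)) (mid : Nat)
    (hm : mid < l.length) (h : t ≤ l[mid]) :
    l.countP (fun e => decide (e < t)) ≤ mid := by
  have hsplit : l = l.take mid ++ l.drop mid := (List.take_append_drop _ _).symm
  have hzero : (l.drop mid).countP (fun e => decide (e < t)) = 0 := by
    rw [List.countP_eq_zero]
    intro a ha
    obtain ⟨i, hi, rfl⟩ := List.getElem_of_mem ha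
    have hgi : (l.drop mid)[i] = l[mid + i]'(by simp at hi; omega) := List.getElem_drop ..
    rw [hgi]
    rcases Nat.eq_zero_or_pos i with rfl | hpos
    · simpa using not_lt.mpr h
    · have : l[mid] ≤ l[mid + i]'(by simp at hi; omega) :=
        (List.pairwise_iff_getElem.mp hs) mid (mid + i) hm (by simp at hi; omega) (by omega)
      simpa using not_lt.mpr (le_trans h this)
  have hlen : (l.take mid).length = mid := by simp; omega
  conv_lhs => rw [hsplit]
  rw [List.countP_append, hzero]
  have h1 : (l.take mid).countP (fun e => decide (e < t)) ≤ (l.take mid).length :=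
    List.countP_le_length ..
  omega

-- the binary-search loop lands exactly on the count of elements < t
lemma pvBl_eq (l : List Int) (t : Int) (hs : l.Pairwise (· ≤ ·)) :
    ∀ n lo hi, hi - lo ≤ n → hi ≤ l.length →
      lo ≤ l.countP (fun e => decide (e < t)) → l.countP (fun e => decide (e < t)) ≤ hi →
      pvBl l t n lo hi = l.countP (fun e => decide (e < t)) := by
  intro n
  induction n with
  | zero =>
    intro lo hi hfuel hhi hlo hc
    simp only [pvBl]
    omega
  | succ n ih =>
    intro lo hi hfuel hhi hlo hc
    rw [pvBl]
    by_cases hlt : lo < hi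
    · simp only [hlt, if_true]
      set mid := (lo + hi) / 2 with hmid
      have hmlo : lo ≤ mid := by omega
      have hmhi : mid < hi := by omega
      have hmlen : mid < l.length := by omega
      have hget : PySem.List.pyGetD l (mid : Int) 0 = l[mid] := by
        rw [PySem.List.pyGetD_natCast, List.getD_eq_getElem _ _ hmlen]
      rw [hget]
      by_cases hcmp : l[mid] < t
      · simp only [hcmp, if_true]
        exact ih (mid + 1) hi (by omega) hhi (pv_lt_count l t hs mid hmlen hcmp) hc
      · simp only [hcmp, if_false]
        exact ih lo mid (by omega) (by omega) hlo
          (pv_count_le l t hs mid hmlen (not_lt.mp hcmp))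
    · simp only [hlt, if_false]; omega

lemma pvBl_top (l : List Int) (t : Int) (hs : l.Pairwise (· ≤ ·)) :
    pvBl l t l.length 0 l.length = l.countP (fun e => decide (e < t)) :=
  pvBl_eq l t hs l.length 0 l.length (by omega) le_rfl (Nat.zero_le _)
    (List.countP_le_length ..)

-- per-row value of B equals per-row value of A
lemma pv_row (special : List (List Int)) (x0 : Int) :
    ((PySem.List.sorted (special.map (fun y => PySem.List.pyGetD y (1 : Int) 0)) (fun e => e) false).length : Int)
      - (pvBl (PySem.List.sorted (special.map (fun y => PySem.List.pyGetD y (1 : Int) 0)) (fun e => e) false) x0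
          (PySem.List.sorted (special.map (fun y => PySem.List.pyGetD y (1 : Int) 0)) (fun e => e) false).length 0
          (PySem.List.sorted (special.map (fun y => PySem.List.pyGetD y (1 : Int) 0)) (fun e => e) false).length : Int)
    = (special.countP (fun y => decide (x0 ≤ PySem.List.pyGetD y (1 : Int) 0)) : Int) := by
  have hpair : (PySem.List.sorted (special.map (fun y => PySem.List.pyGetD y (1 : Int) 0)) (fun e => e) false).Pairwise (· ≤ ·) :=
    PySem.List.sorted_pairwise ..
  have hperm := PySem.List.sorted_perm (special.map (fun y => PySem.List.pyGetD y (1 : Int) 0)) (fun e => e) false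
  rw [pvBl_top _ x0 hpair]
  have hcnt : (PySem.List.sorted (special.map (fun y => PySem.List.pyGetD y (1 : Int) 0)) (fun e => e) false).countP
        (fun e => decide (e < x0))
      = special.countP (fun y => decide (PySem.List.pyGetD y (1 : Int) 0 < x0)) := by
    rw [hperm.countP_eq, List.countP_map]; rfl
  have hsum : special.countP (fun y => decide (x0 ≤ PySem.List.pyGetD y (1 : Int) 0))
      + special.countP (fun y => decide (PySem.List.pyGetD y (1 : Int) 0 < x0)) = special.length := by
    have h := List.length_eq_countP_add_countP
      (p := fun y => decide (x0 ≤ PySem.List.pyGetD y (1 : Int) 0)) (l := special)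
    rw [h]
    congr 1
    apply List.countP_congr
    intro y _
    simp [not_le]
  have hlen : (PySem.List.sorted (special.map (fun y => PySem.List.pyGetD y (1 : Int) 0)) (fun e => e) false).length
      = special.length := by
    rw [PySem.List.length_sorted, List.length_map]
  rw [hcnt, hlen]
  omega

-- ===== VERDICT (by name: the statement is the Claim_ definition above) =====
theorem Special_Interval_spec : Claim_equal_Special_Interval := by
  intro nonspecial special _hdom _hpre
  unfold Spec_Special_Interval Special_Interval Special_Interval_alt
  rw [PySem.List.foldl_append_singleton_eq_map, PySem.List.foldl_append_singleton_eq_map]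
  apply List.map_congr_left
  intro x _
  rw [PySem.List.foldl_ite_add_one, pv_row special (PySem.List.pyGetD x (0 : Int) 0)]
  omega
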